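-- pv_equiv track=rewrite | github.com/Carmoldu/AoC22 | Day14/problem.py | generate_floor
-- ===== SOURCE A (Python) =====
-- def generate_floor(raw_rock_formations):
--     # Since we cannot generate an infinite floor, we compute the maximum and minimum theoretical x the sand can get to,
--     # which is equal to the min_x - depth and max_x + depth
--     min_x = min([x for raw_rock_formation in raw_rock_formations for depth, x in raw_rock_formation])
--     max_x = max([x for raw_rock_formation in raw_rock_formations for depth, x in raw_rock_formation])
--     min_depth =  0
--     max_depth = max([depth for raw_rock_formation in raw_rock_formations for depth, x in raw_rock_formation])
--
--     floor_min_x = min_x - (max_depth - min_depth)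
--     floor_max_x = max_x + (max_depth - min_depth)
--     floor_depth = max_depth + 2
--
--     return [(floor_depth, floor_min_x), (floor_depth, floor_max_x)]
-- ===== SOURCE B (Python) =====
-- def generate_floor(raw_rock_formations):
--     # Extrema via sorting: sort the x-values and the depths, then read the endpoints.
--     xs = sorted(x for formation in raw_rock_formations for _, x in formation)
--     ds = sorted(d for formation in raw_rock_formations for d, _ in formation)
--     min_x, max_x, max_depth = xs[0], xs[-1], ds[-1]
--     floor_depth = max_depth + 2
--     return [(floor_depth, min_x - max_depth), (floor_depth, max_x + max_depth)]
-- ===== Notes on version B (the rewrite author's own statement) =====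
-- stated objective: alternative
-- what changed: Replaces the min/max scans over comprehension-built lists with sort-then-endpoints: sort the x-values and the depths once and read min_x = xs[0], max_x = xs[-1], max_depth = ds[-1].
import Mathlib
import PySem

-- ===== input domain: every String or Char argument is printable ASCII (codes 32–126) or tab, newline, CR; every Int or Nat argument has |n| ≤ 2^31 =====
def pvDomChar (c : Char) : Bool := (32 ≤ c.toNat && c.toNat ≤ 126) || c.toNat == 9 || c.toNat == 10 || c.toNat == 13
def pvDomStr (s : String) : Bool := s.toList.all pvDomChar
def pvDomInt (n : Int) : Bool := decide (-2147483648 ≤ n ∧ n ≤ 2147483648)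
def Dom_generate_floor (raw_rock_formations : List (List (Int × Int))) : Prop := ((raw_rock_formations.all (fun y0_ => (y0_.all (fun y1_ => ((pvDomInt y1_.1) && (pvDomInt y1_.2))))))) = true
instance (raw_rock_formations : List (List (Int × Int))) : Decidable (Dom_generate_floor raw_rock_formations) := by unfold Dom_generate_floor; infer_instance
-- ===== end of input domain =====

-- B computes the extrema by sort-then-endpoints (sort x-values and depths, read xs[0], xs[-1], ds[-1])
-- instead of A's min/max scans over comprehension-built lists (objective: alternative algorithm).


-- ===== PORT A =====
def generate_floor (raw_rock_formations : List (List (Int × Int))) : List (Int × Int) :=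
  -- [x for f in fs for depth, x in f]
  let xs := raw_rock_formations.foldl (fun acc f => acc ++ f.map (fun p => p.2)) []
  -- [depth for f in fs for depth, x in f]
  let ds := raw_rock_formations.foldl (fun acc f => acc ++ f.map (fun p => p.1)) []
  match PySem.List.min? xs (fun y => y), PySem.List.max? xs (fun y => y),
        PySem.List.max? ds (fun y => y) with
  | some min_x, some max_x, some max_depth =>
    let min_depth : Int := 0
    let floor_min_x := min_x - (max_depth - min_depth)
    let floor_max_x := max_x + (max_depth - min_depth)
    let floor_depth := max_depth + 2
    [(floor_depth, floor_min_x), (floor_depth, floor_max_x)]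
  | _, _, _ => []  -- Python raises ValueError (min/max of empty list); outside Pre_

-- ===== PORT B =====
def generate_floor_alt (raw_rock_formations : List (List (Int × Int))) : List (Int × Int) :=
  -- sorted(x for f in fs for _, x in f), sorted(d for f in fs for d, _ in f)
  let xs := PySem.List.sorted (raw_rock_formations.flatMap (fun f => f.map (fun p => p.2))) (fun y => y) false
  let ds := PySem.List.sorted (raw_rock_formations.flatMap (fun f => f.map (fun p => p.1))) (fun y => y) false
  match PySem.List.pyGet? xs 0 with
  | none => []  -- Python raises IndexError on an empty list; outside Pre_
  | some min_x =>
    match PySem.List.pyGet? xs (-1) with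
    | none => []
    | some max_x =>
      match PySem.List.pyGet? ds (-1) with
      | none => []
      | some max_depth =>
        let floor_depth := max_depth + 2
        [(floor_depth, min_x - max_depth), (floor_depth, max_x + max_depth)]

-- ===== PRECONDITION & SPEC =====
-- On input with no points at all A raises ValueError (min of empty sequence) and B raises IndexError.
def Pre_generate_floor (raw_rock_formations : List (List (Int × Int))) : Prop :=
  (raw_rock_formations.any (fun f => !f.isEmpty)) = true
instance (raw_rock_formations : List (List (Int × Int))) : Decidable (Pre_generate_floor raw_rock_formations) := by unfold Pre_generate_floor; infer_instance
def pvWitness_generate_floor : (List (List (Int × Int))) := ([[(3, 5)], [(1, 9), (0, 2)]])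

def Spec_generate_floor (raw_rock_formations : List (List (Int × Int))) (out : List (Int × Int)) : Prop := out = generate_floor_alt raw_rock_formations
instance (raw_rock_formations : List (List (Int × Int))) (out : List (Int × Int)) : Decidable (Spec_generate_floor raw_rock_formations out) := by unfold Spec_generate_floor; infer_instance

-- ===== CLAIM (what is proved, stated in full; the proofs are below) =====
def Claim_equal_generate_floor : Prop := ∀ (raw_rock_formations : List (List (Int × Int))), Dom_generate_floor raw_rock_formations → Pre_generate_floor raw_rock_formations → Spec_generate_floor raw_rock_formations (generate_floor raw_rock_formations)

-- ===== LEMMAS AND PROOFS =====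

-- A's comprehension foldl builds the flat map of the concatenated point list.
theorem gf_foldl_append (g : Int × Int → Int) :
    ∀ (fs : List (List (Int × Int))) (acc : List Int),
      fs.foldl (fun acc f => acc ++ f.map g) acc = acc ++ (fs.flatMap (fun f => f.map g)) := by
  intro fs
  induction fs with
  | nil => simp
  | cons f t ih => intro acc; simp [List.foldl_cons, ih, List.flatMap_cons]

-- In a ≤-sorted nonempty Int list, the last element is an upper bound.
theorem gf_le_getLast :
    ∀ (ys : List Int) (h : ys ≠ []), ys.Pairwise (· ≤ ·) → ∀ y ∈ ys, y ≤ ys.getLast h := by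
  intro ys
  induction ys with
  | nil => intro h; exact absurd rfl h
  | cons a t ih =>
    intro _ hp y hy
    rcases List.pairwise_cons.1 hp with ⟨ha, ht⟩
    cases t with
    | nil => simp at hy; simp [hy, List.getLast]
    | cons b s =>
      rw [List.getLast_cons (by simp)]
      rcases List.mem_cons.1 hy with rfl | hyt
      · exact le_trans (ha b (by simp)) (ih (by simp) ht b (by simp))
      · exact ih (by simp) ht y hyt

-- head of sorted(zs) = min(zs)  (as values)
theorem gf_sorted_head_min (zs : List Int) (m a : Int) (t : List Int)
    (hm : PySem.List.min? zs (fun y => y) = some m)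
    (hs : PySem.List.sorted zs (fun y => y) false = a :: t) : a = m := by
  have hmem : a ∈ zs := by
    rw [← PySem.List.mem_sorted (key := fun y => y) (rev := false), hs]; simp
  have h1 : a ≤ m := PySem.List.key_head_sorted_le zs (fun y => y) hs m (PySem.List.min?_mem hm)
  have h2 : m ≤ a := PySem.List.min?_isMin hm a hmem
  omega

-- last of sorted(zs) = max(zs)  (as values)
theorem gf_sorted_last_max (zs : List Int) (m a : Int) (t : List Int)
    (hm : PySem.List.max? zs (fun y => y) = some m)
    (hs : PySem.List.sorted zs (fun y => y) false = a :: t) :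
    (a :: t).getLast (List.cons_ne_nil a t) = m := by
  have hlast : (a :: t).getLast (List.cons_ne_nil a t) ∈ zs := by
    rw [← PySem.List.mem_sorted (key := fun y => y) (rev := false), hs]
    exact List.getLast_mem _
  have hp : (a :: t).Pairwise (· ≤ ·) := by
    have := PySem.List.sorted_pairwise (xs := zs) (key := fun y : Int => y)
    rw [hs] at this; simpa using this
  have h1 : (a :: t).getLast (List.cons_ne_nil a t) ≤ m := PySem.List.max?_isMax hm _ hlast
  have h2 : m ≤ (a :: t).getLast (List.cons_ne_nil a t) := by
    refine gf_le_getLast _ (List.cons_ne_nil a t) hp m ?_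
    rw [← hs, PySem.List.mem_sorted]
    exact PySem.List.max?_mem hm
  omega

-- ===== VERDICT (by name: the statement is the Claim_ definition above) =====
theorem generate_floor_spec : Claim_equal_generate_floor := by
  intro fs _ hpre
  unfold Spec_generate_floor generate_floor generate_floor_alt
  rw [gf_foldl_append (fun p : Int × Int => p.2) fs [],
      gf_foldl_append (fun p : Int × Int => p.1) fs []]
  simp only [List.nil_append]
  set zx := fs.flatMap (fun f => f.map (fun p : Int × Int => p.2)) with hzx
  set zd := fs.flatMap (fun f => f.map (fun p : Int × Int => p.1)) with hzd
  have hne : zx ≠ [] := by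
    unfold Pre_generate_floor at hpre
    simp only [List.any_eq_true, Bool.not_eq_true', List.isEmpty_eq_false_iff] at hpre
    obtain ⟨f, hf, hfne⟩ := hpre
    obtain ⟨p, hp⟩ := List.exists_mem_of_ne_nil f hfne
    intro hnil
    have : p.2 ∈ zx := by
      rw [hzx]; exact List.mem_flatMap.2 ⟨f, hf, List.mem_map.2 ⟨p, hp, rfl⟩⟩
    rw [hnil] at this; exact absurd this (List.not_mem_nil)
  have hned : zd ≠ [] := by
    intro hnil
    apply hne
    have := congrArg List.length hnil
    rw [hzd] at this
    rw [hzx]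
    apply List.eq_nil_of_length_eq_zero
    simp only [List.length_flatMap, List.length_map, List.length_nil] at this ⊢
    simpa using this
  obtain ⟨mn, hmn⟩ : ∃ m, PySem.List.min? zx (fun y => y) = some m := by
    cases h : PySem.List.min? zx (fun y => y) with
    | none => exact absurd ((PySem.List.min?_eq_none_iff zx _).1 h) hne
    | some m => exact ⟨m, rfl⟩
  obtain ⟨mx, hmx⟩ : ∃ m, PySem.List.max? zx (fun y => y) = some m := by
    cases h : PySem.List.max? zx (fun y => y) with
    | none => exact absurd ((PySem.List.max?_eq_none_iff zx _).1 h) hne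
    | some m => exact ⟨m, rfl⟩
  obtain ⟨md, hmd⟩ : ∃ m, PySem.List.max? zd (fun y => y) = some m := by
    cases h : PySem.List.max? zd (fun y => y) with
    | none => exact absurd ((PySem.List.max?_eq_none_iff zd _).1 h) hned
    | some m => exact ⟨m, rfl⟩
  cases hsx : PySem.List.sorted zx (fun y => y) false with
  | nil => exact absurd ((PySem.List.sorted_eq_nil_iff zx _ _).1 hsx) hne
  | cons a t =>
  cases hsd : PySem.List.sorted zd (fun y => y) false with
  | nil => exact absurd ((PySem.List.sorted_eq_nil_iff zd _ _).1 hsd) hned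
  | cons b u =>
  have hg0 : PySem.List.pyGet? (a :: t) (0 : Int) = some a := by
    simp [PySem.List.pyGet?, PySem.List.pyIdx?]
  have hg1 : PySem.List.pyGet? (a :: t) (-1 : Int) = some ((a :: t).getLast (List.cons_ne_nil a t)) := by
    simp [PySem.List.pyGet?, PySem.List.pyIdx?, List.getLast_eq_getElem]; rfl
  have hg2 : PySem.List.pyGet? (b :: u) (-1 : Int) = some ((b :: u).getLast (List.cons_ne_nil b u)) := by
    simp [PySem.List.pyGet?, PySem.List.pyIdx?, List.getLast_eq_getElem]; rfl
  rw [gf_sorted_last_max zx mx a t hmx hsx] at hg1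
  rw [gf_sorted_last_max zd md b u hmd hsd] at hg2
  rw [hmn, hmx, hmd, hg0, hg1, hg2, gf_sorted_head_min zx mn a t hmn hsx]
  simp
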